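-- pv_equiv track=rewrite | github.com/utcompling/texnlp | src/main/python/sexpr_parse.py | _gen_tokens
-- ===== SOURCE A (Python) =====
-- def _gen_tokens(line):
--   line_len = len(line)
--   left = 0
--
--   while left < line_len:
--     c = line[left]
--
--     if c.isspace():
--       left += 1
--     elif c in '()':
--       yield c
--       left += 1
--
--     else:
--       right = left + 1
--       while right < line_len:
--         c = line[right]
--         if c.isspace() or c in '()':
--           break
--
--         right += 1
--
--       token = line[left:right]
--       #if token.isdigit():
--       #  token = int(token)
--       yield token
--
--       left = right
-- ===== SOURCE B (Python) =====
-- def _gen_tokens(line):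
--   token = ''
--   for c in line:
--     if c.isspace():
--       if token:
--         yield token
--       token = ''
--     elif c in '()':
--       if token:
--         yield token
--       token = ''
--       yield c
--     else:
--       token += c
--   if token:
--     yield token
-- ===== Notes on version B (the rewrite author's own statement) =====
-- stated objective: simpler
-- what changed: Replaces A's index-based outer/inner while loops (left/right pointers plus slicing) with a single for-loop over characters that accumulates a token buffer and flushes it at whitespace/parens and at end of line.
import Mathlib
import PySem

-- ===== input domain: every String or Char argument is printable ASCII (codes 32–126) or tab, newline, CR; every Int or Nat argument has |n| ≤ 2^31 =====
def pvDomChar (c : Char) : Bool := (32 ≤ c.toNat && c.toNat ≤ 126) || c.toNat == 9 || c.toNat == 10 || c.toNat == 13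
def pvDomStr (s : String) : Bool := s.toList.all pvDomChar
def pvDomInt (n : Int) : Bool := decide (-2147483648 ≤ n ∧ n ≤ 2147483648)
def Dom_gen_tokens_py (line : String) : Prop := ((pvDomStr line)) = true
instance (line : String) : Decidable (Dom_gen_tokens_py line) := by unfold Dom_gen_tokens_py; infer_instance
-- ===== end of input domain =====

-- B replaces A's two index-based while loops with one buffered character scan; objective: simpler.

-- ===== PORT A =====
-- inner 'while right < line_len' loop of A: advance right until a delimiter
def pvInnerA (cs : List Char) (n right : Nat) : Nat :=
  if right < n then
    let c := cs.getD right ' '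
    if PySem.Chars.isspace c || c = '(' || c = ')' then right
    else pvInnerA cs n (right + 1)
  else right
termination_by n - right

-- outer 'while left < line_len' loop of A
def pvOuterA (cs : List Char) (n left : Nat) : List String :=
  if h : left < n then
    let c := cs.getD left ' '
    if PySem.Chars.isspace c then pvOuterA cs n (left + 1)
    else if c = '(' || c = ')' then String.ofList [c] :: pvOuterA cs n (left + 1)
    else
      let right := pvInnerA cs n (left + 1)
      String.ofList (PySem.List.slice cs (some (left : Int)) (some (right : Int))) ::
        pvOuterA cs n right
  else []
termination_by n - left
decreasing_by
  · omega
  · omega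
  · have : left + 1 ≤ pvInnerA cs n (left + 1) := by
      clear h
      generalize left + 1 = r
      fun_induction pvInnerA cs n r with
      | case1 => omega
      | case2 r _ _ _ ih => omega
      | case3 => omega
    omega

def gen_tokens_py (line : String) : List String :=
  pvOuterA line.toList line.toList.length 0

-- ===== PORT B =====
-- single scan with a token buffer (Source B's for-loop; buffer flushed at delimiters and at the end)
def pvScanB (token : List Char) (cs : List Char) : List String :=
  match cs with
  | [] => if token = [] then [] else [String.ofList token]
  | c :: rest =>
    if PySem.Chars.isspace c then
      (if token = [] then [] else [String.ofList token]) ++ pvScanB [] rest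
    else if c = '(' || c = ')' then
      (if token = [] then [] else [String.ofList token]) ++ (String.ofList [c] :: pvScanB [] rest)
    else pvScanB (token ++ [c]) rest

def gen_tokens_py_alt (line : String) : List String :=
  pvScanB [] line.toList

-- ===== PRECONDITION & SPEC =====
def Spec_gen_tokens_py (line : String) (out : List String) : Prop := out = gen_tokens_py_alt line
instance (line : String) (out : List String) : Decidable (Spec_gen_tokens_py line out) := by unfold Spec_gen_tokens_py; infer_instance

-- ===== CLAIM (what is proved, stated in full; the proofs are below) =====
def Claim_equal_gen_tokens_py : Prop := ∀ (line : String), Dom_gen_tokens_py line → Spec_gen_tokens_py line (gen_tokens_py line)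

-- ===== LEMMAS AND PROOFS =====

def pvDelim (c : Char) : Bool := PySem.Chars.isspace c || c = '(' || c = ')'

theorem pvInnerA_ge (cs : List Char) (n r : Nat) : r ≤ pvInnerA cs n r := by
  fun_induction pvInnerA cs n r with
  | case1 => omega
  | case2 r _ _ _ ih => omega
  | case3 => omega

theorem pvInnerA_le (cs : List Char) (n r : Nat) : pvInnerA cs n r ≤ max n r := by
  fun_induction pvInnerA cs n r with
  | case1 => omega
  | case2 r _ _ _ ih => omega
  | case3 => omega

theorem pvInnerA_nondelim (cs : List Char) (n r : Nat) :
    ∀ j, r ≤ j → j < pvInnerA cs n r → pvDelim (cs.getD j ' ') = false := by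
  fun_induction pvInnerA cs n r with
  | case1 r _ c _ => intro j h1 h2; omega
  | case2 r hr c hcd ih =>
    intro j h1 h2
    by_cases hj : j = r
    · subst hj; simp [pvDelim]; simpa using hcd
    · exact ih j (by omega) h2
  | case3 r hr => intro j h1 h2; omega

theorem pvInnerA_end (cs : List Char) (n r : Nat) :
    r ≤ n → pvInnerA cs n r = n ∨ pvDelim (cs.getD (pvInnerA cs n r) ' ') = true := by
  fun_induction pvInnerA cs n r with
  | case1 r _ c hc => intro _; right; simpa [pvDelim] using hc
  | case2 r hr c hcd ih => intro _; exact ih (by omega)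
  | case3 r hr => intro hrn; left; omega

-- flushing: B just accumulates over a run of non-delimiter characters
theorem pvScanB_run (mid : List Char) (hm : ∀ c ∈ mid, pvDelim c = false) :
    ∀ (tok rest : List Char), pvScanB tok (mid ++ rest) = pvScanB (tok ++ mid) rest := by
  induction mid with
  | nil => intro tok rest; simp
  | cons c cs ih =>
    intro tok rest
    have hc : pvDelim c = false := hm c (by simp)
    have hcs : ∀ x ∈ cs, pvDelim x = false := fun x hx => hm x (by simp [hx])
    simp only [pvDelim, Bool.or_eq_false_iff, decide_eq_false_iff_not] at hc
    simp [pvScanB, hc.1.1, hc.1.2, hc.2, ih hcs]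

-- a nonempty buffer followed by end-of-input or a delimiter is emitted as one token
theorem pvScanB_flush (tok rest : List Char) (htok : tok ≠ [])
    (hrest : rest = [] ∨ pvDelim (rest.getD 0 ' ') = true) :
    pvScanB tok rest = String.ofList tok :: pvScanB [] rest := by
  cases rest with
  | nil => simp [pvScanB, htok]
  | cons d r =>
    rcases hrest with h | h
    · simp at h
    · simp only [List.getD_cons_zero, pvDelim, Bool.or_eq_true_iff, decide_eq_true_eq] at h
      by_cases hs : PySem.Chars.isspace d = true
      · simp [pvScanB, hs, htok]
      · have hd : d = '(' ∨ d = ')' := by tauto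
        have : (d = '(' || d = ')') = true := by rcases hd with h | h <;> simp [h]
        simp [pvScanB, hs, this, htok]

theorem pv_main (cs : List Char) (left : Nat) :
    pvOuterA cs cs.length left = pvScanB [] (cs.drop left) := by
  generalize hfuel : cs.length - left = fuel
  induction fuel using Nat.strong_induction_on generalizing left with
  | _ fuel ih =>
  by_cases h : left < cs.length
  · have hcons : cs.drop left = cs.getD left ' ' :: cs.drop (left + 1) := by
      rw [List.drop_eq_getElem_cons h]
      rw [List.getD_eq_getElem?_getD, List.getElem?_eq_getElem h]
      rfl
    set c := cs.getD left ' ' with hc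
    by_cases hs : PySem.Chars.isspace c = true
    · rw [pvOuterA, dif_pos h, if_pos hs, hcons, pvScanB, if_pos hs]
      rw [if_pos rfl, List.nil_append]
      exact ih (cs.length - (left + 1)) (by omega) (left + 1) rfl
    · by_cases hp : (c = '(' || c = ')') = true
      · rw [pvOuterA, dif_pos h, if_neg hs, if_pos hp, hcons, pvScanB, if_neg hs, if_pos hp]
        rw [if_pos rfl, List.nil_append]
        rw [ih (cs.length - (left + 1)) (by omega) (left + 1) rfl]
      · -- atom case
        set right := pvInnerA cs cs.length (left + 1) with hr
        have hge : left + 1 ≤ right := pvInnerA_ge _ _ _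
        have hle : right ≤ cs.length := by
          have := pvInnerA_le cs cs.length (left + 1)
          omega
        rw [pvOuterA, dif_pos h, if_neg hs, if_neg hp]
        show String.ofList (PySem.List.slice cs (some (left : Int)) (some (right : Int))) ::
            pvOuterA cs cs.length right = pvScanB [] (cs.drop left)
        have hslice : PySem.List.slice cs (some (left : Int)) (some (right : Int)) =
            (cs.drop left).take (right - left) := PySem.List.slice_natCast cs left right
        set mid := (cs.drop (left + 1)).take (right - (left + 1)) with hmid
        have hdropsplit : cs.drop (left + 1) = mid ++ cs.drop right := by
          rw [hmid]
          have hdd : cs.drop right = (cs.drop (left + 1)).drop (right - (left + 1)) := by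
            rw [List.drop_drop]
            congr 1
            omega
          rw [hdd, List.take_append_drop]
        have htok : (cs.drop left).take (right - left) = c :: mid := by
          rw [hcons]
          have hrl : right - left = (right - (left + 1)) + 1 := by omega
          rw [hrl, List.take_succ_cons]
        have hmidnd : ∀ x ∈ mid, pvDelim x = false := by
          intro x hx
          rw [hmid] at hx
          obtain ⟨i, hi, hxi⟩ := List.mem_iff_getElem.mp hx
          have h2 := hi
          rw [List.length_take, List.length_drop] at h2
          have hxval : cs.getD (left + 1 + i) ' ' = x := by
            rw [← hxi, List.getElem_take, List.getElem_drop]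
            rw [List.getD_eq_getElem?_getD, List.getElem?_eq_getElem (by omega)]
            rfl
          rw [← hxval]
          apply pvInnerA_nondelim cs cs.length (left + 1) (left + 1 + i) (by omega)
          rw [← hr]
          omega
        rw [hslice, htok]
        rw [hcons]
        have hcnd : pvDelim c = false := by
          simp only [pvDelim, hs]
          simp at hp ⊢
          tauto
        have hall : ∀ x ∈ c :: mid, pvDelim x = false := by
          intro x hx
          rcases List.mem_cons.mp hx with hxc | hxm
          · rw [hxc]; exact hcnd
          · exact hmidnd x hxm
        rw [show pvScanB [] (c :: cs.drop (left + 1)) = pvScanB ([] ++ (c :: mid)) (cs.drop right) by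
          rw [← pvScanB_run (c :: mid) hall]
          simp [hdropsplit]]
        simp only [List.nil_append]
        rw [pvScanB_flush (c :: mid) (cs.drop right) (by simp)]
        · congr 1
          exact ih (cs.length - right) (by omega) right rfl
        · by_cases hrn : right = cs.length
          · left; rw [hrn]; simp
          · right
            have hlt : right < cs.length := by omega
            rcases pvInnerA_end cs cs.length (left + 1) (by omega) with he | he
            · rw [← hr] at he; exact absurd he hrn
            · rw [← hr] at he
              rw [List.getD_eq_getElem?_getD, List.getElem?_drop, Nat.add_zero,
                List.getElem?_eq_getElem hlt]
              rw [List.getD_eq_getElem?_getD, List.getElem?_eq_getElem hlt] at he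
              exact he
  · rw [pvOuterA, dif_neg h, List.drop_eq_nil_of_le (by omega), pvScanB]
    simp

-- ===== VERDICT (by name: the statement is the Claim_ definition above) =====
theorem gen_tokens_py_spec : Claim_equal_gen_tokens_py := by
  intro line _
  unfold Spec_gen_tokens_py gen_tokens_py gen_tokens_py_alt
  simpa using pv_main line.toList 0
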